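-- pv_equiv track=rewrite | github.com/jcg-admin/IACT | infrastructure/cpython/utils/procedure_parser.py | _commands_from_code_block
-- ===== SOURCE A (Python) =====
-- from typing import Dict, Iterable, List, Sequence, Tuple
--
-- _CODE_LANG_COMMANDS = {"", "bash", "sh", "shell"}
--
-- def _commands_from_code_block(lines: Iterable[str], language: str) -> List[str]:
--     """Extract executable commands from a code block."""
--
--     if language not in _CODE_LANG_COMMANDS:
--         return []
--
--     commands: List[str] = []
--     buffer = ""
--     for raw_line in lines:
--         stripped = raw_line.strip()
--         if not stripped or stripped.startswith("#"):
--             continue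
--
--         if stripped.endswith("\\"):
--             part = stripped.rstrip("\\").strip()
--             buffer = f"{buffer} {part}".strip() if buffer else part
--             continue
--
--         if buffer:
--             combined = f"{buffer} {stripped}".strip()
--             commands.append(combined)
--             buffer = ""
--         else:
--             commands.append(stripped)
--
--     if buffer:
--         commands.append(buffer.strip())
--
--     return commands
-- ===== SOURCE B (Python) =====
-- _CODE_LANG_COMMANDS = {"", "bash", "sh", "shell"}
--
--
-- def _split_segment(items):
--     """Split off the first backslash-continued segment: (fragments, rest)."""
--     if not items:
--         return [], []
--     head, tail = items[0], items[1:]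
--     if head.endswith("\\"):
--         frags, rest = _split_segment(tail)
--         return [head] + frags, rest
--     return [head], tail
--
--
-- def _clean_join(frags):
--     cleaned = [f for f in (x.rstrip("\\").strip() for x in frags) if f]
--     return " ".join(cleaned)
--
--
-- def _parse(items):
--     """Recursively peel one segment at a time, emitting its joined command."""
--     if not items:
--         return []
--     frags, rest = _split_segment(items)
--     cmd = _clean_join(frags)
--     tail = _parse(rest)
--     return [cmd] + tail if cmd else tail
--
--
-- def _commands_from_code_block(lines, language):
--     """Extract executable commands from a code block."""
--     if language not in _CODE_LANG_COMMANDS: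
--         return []
--     kept = [s for s in (line.strip() for line in lines) if s and not s.startswith("#")]
--     return _parse(kept)
-- ===== Notes on version B (the rewrite author's own statement) =====
-- stated objective: alternative
-- what changed: A is one stateful loop threading a growing string buffer that it re-strips on every continuation line; B first filters the stripped lines, then recursively splits the list into backslash-continued segments with a dedicated splitter and joins each segment's cleaned nonempty fragments, consing the commands front-to-back.
import Mathlib
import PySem

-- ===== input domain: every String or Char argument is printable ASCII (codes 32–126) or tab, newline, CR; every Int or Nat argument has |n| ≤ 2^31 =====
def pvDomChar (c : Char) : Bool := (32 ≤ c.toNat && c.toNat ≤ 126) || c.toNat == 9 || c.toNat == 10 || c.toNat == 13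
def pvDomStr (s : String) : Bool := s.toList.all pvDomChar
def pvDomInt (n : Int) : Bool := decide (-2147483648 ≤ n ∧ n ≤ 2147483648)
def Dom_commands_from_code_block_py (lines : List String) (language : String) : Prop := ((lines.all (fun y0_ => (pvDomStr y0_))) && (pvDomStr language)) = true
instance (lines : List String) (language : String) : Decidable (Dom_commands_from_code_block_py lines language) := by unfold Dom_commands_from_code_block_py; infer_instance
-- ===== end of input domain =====

-- B replaces A's stateful buffer loop by filter → recursive segment splitting → per-segment join; same return value, alternative structure.

-- ===== PORT A =====
-- exact port of Python's s.rstrip("\\") (strip trailing backslashes), used by both ports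
def pvRstripBS (s : List Char) : List Char :=
  (s.reverse.dropWhile (fun c => c == '\\')).reverse

def pvLoopA : List (List Char) → List (List Char) → List Char → List (List Char)
  | [], commands, buffer =>
      if buffer ≠ [] then commands ++ [PySem.Chars.strip buffer] else commands
  | raw :: rest, commands, buffer =>
      let stripped := PySem.Chars.strip raw
      if stripped = [] ∨ PySem.Chars.startswith stripped ['#'] = true then
        pvLoopA rest commands buffer
      else if PySem.Chars.endswith stripped ['\\'] = true then
        let part := PySem.Chars.strip (pvRstripBS stripped)
        pvLoopA rest commands
          (if buffer ≠ [] then PySem.Chars.strip (buffer ++ ' ' :: part) else part)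
      else if buffer ≠ [] then
        pvLoopA rest (commands ++ [PySem.Chars.strip (buffer ++ ' ' :: stripped)]) []
      else
        pvLoopA rest (commands ++ [stripped]) []

def commands_from_code_block_py (lines : List String) (language : String) : List String :=
  if (["", "bash", "sh", "shell"].contains language) = false then []
  else (pvLoopA (lines.map String.toList) [] []).map String.ofList

-- ===== PORT B =====
-- _split_segment: peel off the first backslash-continued segment and the remainder
def pvSplitSeg : List (List Char) → List (List Char) × List (List Char)
  | [] => ([], [])
  | h :: t =>
      if PySem.Chars.endswith h ['\\'] = true then
        let p := pvSplitSeg t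
        (h :: p.1, p.2)
      else ([h], t)

-- the rest returned by the splitter is no longer than the tail (needed for pvParse's termination)
lemma pvSplitSeg_len : ∀ (l : List (List Char)), (pvSplitSeg l).2.length ≤ l.length
  | [] => by simp [pvSplitSeg]
  | h :: t => by
      simp only [pvSplitSeg]
      split
      · exact le_trans (pvSplitSeg_len t) (by simp)
      · simp

-- _clean_join: rstrip backslashes then strip each fragment, drop empties, join with spaces
def pvCleanFrags (f : List (List Char)) : List (List Char) :=
  (f.map (fun x => PySem.Chars.strip (pvRstripBS x))).filter (fun x => !x.isEmpty)

def pvJoinSp (seg : List (List Char)) : List Char := PySem.Chars.join [' '] seg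

def pvCleanJoin (f : List (List Char)) : List Char := pvJoinSp (pvCleanFrags f)

-- _parse: recursively peel one segment at a time
def pvParse : List (List Char) → List (List Char)
  | [] => []
  | h :: t =>
      let p := pvSplitSeg (h :: t)
      let cmd := pvCleanJoin p.1
      let tail := pvParse p.2
      if cmd ≠ [] then cmd :: tail else tail
termination_by l => l.length
decreasing_by
  simp only [pvSplitSeg, List.length_cons]
  split
  · simpa using Nat.lt_succ_of_le (pvSplitSeg_len t)
  · simp

def commands_from_code_block_py_alt (lines : List String) (language : String) : List String :=
  if (["", "bash", "sh", "shell"].contains language) = false then []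
  else
    let kept := (lines.map (fun l => PySem.Chars.strip l.toList)).filter
        (fun s => !s.isEmpty && !PySem.Chars.startswith s ['#'])
    (pvParse kept).map String.ofList

-- ===== PRECONDITION & SPEC =====
def Spec_commands_from_code_block_py (lines : List String) (language : String) (out : List String) : Prop := out = commands_from_code_block_py_alt lines language
instance (lines : List String) (language : String) (out : List String) : Decidable (Spec_commands_from_code_block_py lines language out) := by unfold Spec_commands_from_code_block_py; infer_instance

-- ===== CLAIM (what is proved, stated in full; the proofs are below) =====
def Claim_equal_commands_from_code_block_py : Prop := ∀ (lines : List String) (language : String), Dom_commands_from_code_block_py lines language → Spec_commands_from_code_block_py lines language (commands_from_code_block_py lines language)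

-- ===== LEMMAS AND PROOFS =====

-- proof-only intermediate: a fold over the already-filtered lines carrying the segment of
-- cleaned nonempty fragments (bridge between A's buffer loop and B's recursive splitter)
def pvLoopM : List (List Char) → List (List Char) → List (List Char) → List (List Char)
  | [], commands, segment =>
      if segment ≠ [] then commands ++ [pvJoinSp segment] else commands
  | s :: rest, commands, segment =>
      let fragment := PySem.Chars.strip (pvRstripBS s)
      let segment' := if fragment ≠ [] then segment ++ [fragment] else segment
      if PySem.Chars.endswith s ['\\'] = true then pvLoopM rest commands segment'
      else pvLoopM rest (commands ++ [pvJoinSp segment']) []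

-- a string with no whitespace at either edge
def pvNoEdge (cs : List Char) : Prop :=
  (∀ c ∈ cs.head?, PySem.Chars.isspace c = false) ∧
  (∀ c ∈ cs.getLast?, PySem.Chars.isspace c = false)

lemma pv_dropWhile_eq_self {p : Char → Bool} {l : List Char}
    (h : ∀ c ∈ l.head?, p c = false) : List.dropWhile p l = l := by
  cases l with
  | nil => rfl
  | cons a t => simp_all [List.dropWhile_cons]

lemma pv_strip_eq_self {cs : List Char} (h : pvNoEdge cs) : PySem.Chars.strip cs = cs := by
  obtain ⟨h1, h2⟩ := h
  have hl : PySem.Chars.lstrip cs = cs := pv_dropWhile_eq_self h1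
  show PySem.Chars.rstrip (PySem.Chars.lstrip cs) = cs
  rw [hl]
  show (List.dropWhile _ cs.reverse).reverse = cs
  rw [pv_dropWhile_eq_self (by simpa [List.head?_reverse] using h2)]
  exact List.reverse_reverse cs

lemma pv_noEdge_strip (cs : List Char) : pvNoEdge (PySem.Chars.strip cs) := by
  constructor
  · intro c hc
    have hpre : (List.dropWhile PySem.Chars.isspace
        (PySem.Chars.lstrip cs).reverse).reverse <+: PySem.Chars.lstrip cs := by
      have := (List.dropWhile_suffix (l := (PySem.Chars.lstrip cs).reverse)
        PySem.Chars.isspace).reverse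
      simpa using this
    obtain ⟨t, ht⟩ := hpre
    have hh := List.head?_dropWhile_not PySem.Chars.isspace cs
    have hs : PySem.Chars.strip cs = (List.dropWhile PySem.Chars.isspace
        (PySem.Chars.lstrip cs).reverse).reverse := rfl
    rw [hs] at hc
    have : (PySem.Chars.lstrip cs).head? = some c := by
      rw [← ht, List.head?_append]
      cases hx : (List.dropWhile PySem.Chars.isspace
        (PySem.Chars.lstrip cs).reverse).reverse.head? with
      | none => simp [hx] at hc
      | some d => simp [hx] at hc ⊢; simpa [hc] using rfl
    have : (List.dropWhile PySem.Chars.isspace cs).head? = some c := this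
    rw [this] at hh
    simpa using hh
  · intro c hc
    have hs : (PySem.Chars.strip cs).getLast? =
        (List.dropWhile PySem.Chars.isspace (PySem.Chars.lstrip cs).reverse).head? := by
      show (List.dropWhile PySem.Chars.isspace
        (PySem.Chars.lstrip cs).reverse).reverse.getLast? = _
      rw [List.getLast?_reverse]
    rw [hs] at hc
    have hh := List.head?_dropWhile_not PySem.Chars.isspace (PySem.Chars.lstrip cs).reverse
    rw [hc] at hh
    simpa using hh

lemma pv_isspace_space : PySem.Chars.isspace ' ' = true := by decide

-- A's buffer-merge step, characterised: gluing a stripped fragment onto a stripped buffer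
lemma pv_strip_glue {b p : List Char} (hb : pvNoEdge b) (hbne : b ≠ [])
    (hp : pvNoEdge p) :
    PySem.Chars.strip (b ++ ' ' :: p) = if p = [] then b else b ++ ' ' :: p := by
  have hhead : (b ++ ' ' :: p).head? = b.head? := by
    rw [List.head?_append]; cases hx : b.head? with
    | none => exact absurd (List.head?_eq_none_iff.mp hx) hbne
    | some d => rfl
  have hl : PySem.Chars.lstrip (b ++ ' ' :: p) = b ++ ' ' :: p := by
    apply pv_dropWhile_eq_self; rw [hhead]; exact hb.1
  show PySem.Chars.rstrip (PySem.Chars.lstrip (b ++ ' ' :: p)) = _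
  rw [hl]
  by_cases hpe : p = []
  · subst hpe
    show (List.dropWhile _ (b ++ [' ']).reverse).reverse = _
    rw [List.reverse_append]
    simp only [List.reverse_singleton, List.singleton_append, List.dropWhile_cons,
      pv_isspace_space, if_pos rfl]
    rw [pv_dropWhile_eq_self (by simpa [List.head?_reverse] using hb.2)]
    simp
  · show (List.dropWhile _ (b ++ ' ' :: p).reverse).reverse = _
    rw [pv_dropWhile_eq_self]
    · simp [hpe]
    · rw [List.head?_reverse, List.getLast?_append]
      cases hx : p.getLast? with
      | none => exact absurd (List.getLast?_eq_none_iff.mp hx) hpe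
      | some d =>
        simp only [List.getLast?_cons, hx, Option.or_some]
        intro c hc
        exact hp.2 c (by rw [hx]; simpa using hc)

lemma pv_joinSp_nil : pvJoinSp [] = [] := rfl

lemma pv_joinSp_singleton (x : List Char) : pvJoinSp [x] = x := by
  simp [pvJoinSp, PySem.Chars.join, List.intercalate]

lemma pv_joinSp_cons_cons (x y : List Char) (r : List (List Char)) :
    pvJoinSp (x :: y :: r) = x ++ ' ' :: pvJoinSp (y :: r) := by
  simp [pvJoinSp, PySem.Chars.join, List.intercalate, List.intersperse]

lemma pv_joinSp_append_singleton {seg : List (List Char)} (h : seg ≠ []) (p : List Char) :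
    pvJoinSp (seg ++ [p]) = pvJoinSp seg ++ ' ' :: p := by
  induction seg with
  | nil => exact absurd rfl h
  | cons x r ih =>
    cases r with
    | nil => simp [pv_joinSp_cons_cons, pv_joinSp_singleton]
    | cons y t =>
      simp only [List.cons_append]
      rw [pv_joinSp_cons_cons, ← List.cons_append, pv_joinSp_cons_cons,
        ih (by simp)]
      simp

lemma pv_joinSp_good {seg : List (List Char)} (hne : seg ≠ [])
    (h : ∀ f ∈ seg, f ≠ [] ∧ pvNoEdge f) :
    pvJoinSp seg ≠ [] ∧ pvNoEdge (pvJoinSp seg) := by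
  induction seg with
  | nil => exact absurd rfl hne
  | cons x r ih =>
    obtain ⟨hx, hxe⟩ := h x (by simp)
    cases r with
    | nil =>
      rw [pv_joinSp_singleton]; exact ⟨hx, hxe⟩
    | cons y t =>
      obtain ⟨hjne, hje⟩ := ih (by simp) (fun f hf => h f (by simp [hf]))
      rw [pv_joinSp_cons_cons]
      refine ⟨by simp [hx], ?_, ?_⟩
      · rw [List.head?_append]
        cases hh : x.head? with
        | none => exact absurd (List.head?_eq_none_iff.mp hh) hx
        | some d =>
          intro c hc
          exact hxe.1 c (by rw [hh]; simpa using hc)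
      · rw [List.getLast?_append]
        cases hh : (pvJoinSp (y :: t)).getLast? with
        | none => exact absurd (List.getLast?_eq_none_iff.mp hh) hjne
        | some d =>
          intro c hc
          simp only [List.getLast?_cons, hh, Option.or_some] at hc
          exact hje.2 c (by rw [hh]; simpa using hc)

lemma pv_rstripBS_of_not_endswith {s : List Char}
    (h : ¬ PySem.Chars.endswith s ['\\'] = true) : pvRstripBS s = s := by
  unfold pvRstripBS
  rw [pv_dropWhile_eq_self, List.reverse_reverse]
  intro c hc
  rw [List.head?_reverse] at hc
  by_contra hbc
  apply h
  rw [PySem.Chars.endswith_iff]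
  have hc' : s.getLast? = some c := hc
  have : c = '\\' := by simpa using hbc
  subst this
  obtain ⟨t, ht⟩ := List.getLast?_eq_some_iff.mp hc'
  exact ⟨t, ht.symm⟩

-- step 1: A's buffer is the space-join of the segment of nonempty stripped fragments
lemma pv_loopA_eq_loopM : ∀ (rest commands seg : List (List Char)),
    (∀ f ∈ seg, f ≠ [] ∧ pvNoEdge f) →
    pvLoopA rest commands (pvJoinSp seg)
      = pvLoopM ((rest.map PySem.Chars.strip).filter
          (fun s => !s.isEmpty && !PySem.Chars.startswith s ['#'])) commands seg := by
  intro rest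
  induction rest with
  | nil =>
    intro commands seg hseg
    show (if pvJoinSp seg ≠ [] then commands ++ [PySem.Chars.strip (pvJoinSp seg)]
          else commands) = _
    by_cases hs : seg = []
    · subst hs; simp [pvLoopM, pv_joinSp_nil]
    · obtain ⟨hjne, hje⟩ := pv_joinSp_good hs hseg
      simp [pvLoopM, hs, hjne, pv_strip_eq_self hje]
  | cons raw rest ih =>
    intro commands seg hseg
    show (let stripped := PySem.Chars.strip raw; _) = _
    simp only [List.map_cons, List.filter_cons]
    set stripped := PySem.Chars.strip raw with hstr
    by_cases hdrop : stripped = [] ∨ PySem.Chars.startswith stripped ['#'] = true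
    · rw [pvLoopA]
      have hf : (!stripped.isEmpty && !PySem.Chars.startswith stripped ['#']) = false := by
        rcases hdrop with h | h
        · simp [h]
        · simp [h]
      rw [if_pos hdrop, hf, if_neg Bool.false_ne_true]
      exact ih commands seg hseg
    · push_neg at hdrop
      obtain ⟨hne, hhash⟩ := hdrop
      have hkeep : (!stripped.isEmpty && !PySem.Chars.startswith stripped ['#']) = true := by
        simp [hne, hhash]
      rw [pvLoopA, if_neg (by push_neg; exact ⟨hne, hhash⟩), hkeep, if_pos rfl]
      rw [← hstr]
      have hnes : pvNoEdge stripped := pv_noEdge_strip raw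
      by_cases hback : PySem.Chars.endswith stripped ['\\'] = true
      · rw [if_pos hback, pvLoopM]
        simp only [if_pos hback]
        set part := PySem.Chars.strip (pvRstripBS stripped) with hpart
        have hnep : pvNoEdge part := pv_noEdge_strip _
        set seg2 := if part ≠ [] then seg ++ [part] else seg with hseg2
        have hsegInv : ∀ f ∈ seg2, f ≠ [] ∧ pvNoEdge f := by
          rw [hseg2]; split_ifs with h
          · intro f hf
            rcases List.mem_append.mp hf with h' | h'
            · exact hseg f h'
            · simp only [List.mem_singleton] at h'; subst h'; exact ⟨h, hnep⟩
          · exact hseg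
        have hbuf : (if pvJoinSp seg ≠ [] then
            PySem.Chars.strip (pvJoinSp seg ++ ' ' :: part) else part) = pvJoinSp seg2 := by
          rw [hseg2]
          by_cases hs : seg = []
          · subst hs
            by_cases hpe : part = [] <;>
              simp [pv_joinSp_nil, pv_joinSp_singleton, hpe]
          · obtain ⟨hjne, hje⟩ := pv_joinSp_good hs hseg
            rw [if_pos hjne, pv_strip_glue hje hjne hnep]
            by_cases hpe : part = []
            · simp [hpe]
            · rw [if_neg hpe, if_pos (by simp [hpe]), pv_joinSp_append_singleton hs]
        rw [hbuf]
        exact ih commands seg2 hsegInv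
      · rw [if_neg hback, pvLoopM]
        simp only [if_neg hback]
        have hfrag : PySem.Chars.strip (pvRstripBS stripped) = stripped := by
          rw [pv_rstripBS_of_not_endswith hback, pv_strip_eq_self hnes]
        rw [hfrag,
          show (if stripped ≠ [] then seg ++ [stripped] else seg) = seg ++ [stripped]
            from if_pos hne]
        have hjoin : pvJoinSp (seg ++ [stripped]) = if pvJoinSp seg ≠ [] then
            PySem.Chars.strip (pvJoinSp seg ++ ' ' :: stripped) else stripped := by
          by_cases hs : seg = []
          · subst hs; simp [pv_joinSp_nil, pv_joinSp_singleton]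
          · obtain ⟨hjne, hje⟩ := pv_joinSp_good hs hseg
            rw [pv_joinSp_append_singleton hs, if_pos hjne,
              pv_strip_glue hje hjne hnes, if_neg hne]
        rw [hjoin]
        by_cases hj : pvJoinSp seg ≠ []
        · rw [if_pos hj, if_pos hj]
          have h2 := ih (commands ++
            [PySem.Chars.strip (pvJoinSp seg ++ ' ' :: stripped)]) [] (by simp)
          rw [pv_joinSp_nil] at h2
          exact h2
        · rw [if_neg hj, if_neg hj]
          have h2 := ih (commands ++ [stripped]) [] (by simp)
          rw [pv_joinSp_nil] at h2
          exact h2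

-- the splitter's remainder is a suffix of its input
lemma pvSplitSeg_suffix : ∀ (l : List (List Char)), (pvSplitSeg l).2 <:+ l
  | [] => by simp [pvSplitSeg]
  | h :: t => by
      simp only [pvSplitSeg]
      split
      · exact (pvSplitSeg_suffix t).trans (List.suffix_cons h t)
      · exact List.suffix_cons h t

lemma pv_cleanFrags_append (a b : List (List Char)) :
    pvCleanFrags (a ++ b) = pvCleanFrags a ++ pvCleanFrags b := by
  unfold pvCleanFrags; simp

-- step 2: the fold over filtered lines equals B's recursive segment parser
lemma pv_loopM_step : ∀ (items : List (List Char)),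
    (∀ s ∈ items, s ≠ [] ∧ pvNoEdge s) → ∀ (seg : List (List Char)),
    (∀ x ∈ seg, x ≠ [] ∧ pvNoEdge x) → ∀ (commands : List (List Char)),
    pvLoopM items commands seg =
      (commands ++
        (if pvJoinSp (seg ++ pvCleanFrags (pvSplitSeg items).1) ≠ [] then
          [pvJoinSp (seg ++ pvCleanFrags (pvSplitSeg items).1)] else []))
        ++ pvLoopM (pvSplitSeg items).2 [] [] := by
  intro items
  induction items with
  | nil =>
    intro _ seg hseg commands
    show (if seg ≠ [] then commands ++ [pvJoinSp seg] else commands) = _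
    simp only [pvSplitSeg, pvCleanFrags, List.map_nil, List.filter_nil, List.append_nil]
    by_cases hs : seg = []
    · subst hs; simp [pvLoopM, pv_joinSp_nil]
    · obtain ⟨hjne, _⟩ := pv_joinSp_good hs hseg
      simp [pvLoopM, hs, hjne]
  | cons h t ih =>
    intro hitems seg hseg commands
    obtain ⟨hhne, hhedge⟩ := hitems h (by simp)
    have htitems : ∀ s ∈ t, s ≠ [] ∧ pvNoEdge s := fun s hs => hitems s (by simp [hs])
    rw [pvLoopM]
    set frag := PySem.Chars.strip (pvRstripBS h) with hfragdef
    by_cases hback : PySem.Chars.endswith h ['\\'] = true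
    · simp only [if_pos hback]
      set seg' := if frag ≠ [] then seg ++ [frag] else seg with hseg'
      have hseg'inv : ∀ x ∈ seg', x ≠ [] ∧ pvNoEdge x := by
        rw [hseg']; split_ifs with hf
        · intro x hx
          rcases List.mem_append.mp hx with h' | h'
          · exact hseg x h'
          · simp only [List.mem_singleton] at h'; subst h'
            exact ⟨hf, by rw [hfragdef]; exact pv_noEdge_strip _⟩
        · exact hseg
      rw [ih htitems seg' hseg'inv commands]
      have hsplit1 : (pvSplitSeg (h :: t)).1 = h :: (pvSplitSeg t).1 := by
        simp [pvSplitSeg, hback]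
      have hsplit2 : (pvSplitSeg (h :: t)).2 = (pvSplitSeg t).2 := by
        simp [pvSplitSeg, hback]
      rw [hsplit1, hsplit2]
      have hclean : pvCleanFrags (h :: (pvSplitSeg t).1)
          = pvCleanFrags [h] ++ pvCleanFrags (pvSplitSeg t).1 := by
        rw [show h :: (pvSplitSeg t).1 = [h] ++ (pvSplitSeg t).1 from rfl,
          pv_cleanFrags_append]
      have hsegeq : seg' ++ pvCleanFrags (pvSplitSeg t).1
          = seg ++ pvCleanFrags (h :: (pvSplitSeg t).1) := by
        rw [hclean, hseg']
        have : pvCleanFrags [h] = if frag ≠ [] then [frag] else [] := by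
          unfold pvCleanFrags
          by_cases hf : frag = [] <;> simp [hfragdef ▸ hf, ← hfragdef, hf]
        rw [this]
        split_ifs with hf <;> simp
      rw [hsegeq]
    · simp only [if_neg hback]
      have hfrageq : frag = h := by
        rw [hfragdef, pv_rstripBS_of_not_endswith hback, pv_strip_eq_self hhedge]
      have hsegup : (if frag ≠ [] then seg ++ [frag] else seg) = seg ++ [h] := by
        rw [hfrageq, if_pos hhne]
      rw [hsegup]
      have hsplit1 : (pvSplitSeg (h :: t)).1 = [h] := by
        simp [pvSplitSeg, hback]
      have hsplit2 : (pvSplitSeg (h :: t)).2 = t := by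
        simp [pvSplitSeg, hback]
      rw [hsplit1, hsplit2]
      have hcleanh : pvCleanFrags [h] = [h] := by
        unfold pvCleanFrags
        simp [← hfragdef, hfrageq, hhne]
      have hsegh : ∀ x ∈ seg ++ [h], x ≠ [] ∧ pvNoEdge x := by
        intro x hx
        rcases List.mem_append.mp hx with h' | h'
        · exact hseg x h'
        · simp only [List.mem_singleton] at h'; subst h'; exact ⟨hhne, hhedge⟩
      obtain ⟨hjne, _⟩ := pv_joinSp_good (by simp) hsegh
      have hloopM0 := ih htitems [] (by simp) []
      simp only [List.nil_append] at hloopM0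
      rw [ih htitems [] (by simp) (commands ++ [pvJoinSp (seg ++ [h])])]
      simp only [List.nil_append, hcleanh, if_pos hjne]
      rw [hloopM0]
      simp
lemma pv_parse_eq_loopM_aux : ∀ (n : Nat) (items : List (List Char)),
    items.length ≤ n → (∀ s ∈ items, s ≠ [] ∧ pvNoEdge s) →
    pvParse items = pvLoopM items [] [] := by
  intro n
  induction n with
  | zero =>
    intro items hlen _
    have : items = [] := List.eq_nil_of_length_eq_zero (Nat.le_zero.mp hlen)
    subst this
    simp [pvParse, pvLoopM]
  | succ n ihn =>
    intro items hlen hitems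
    cases items with
    | nil => simp [pvParse, pvLoopM]
    | cons h t =>
      have hrest : ∀ s ∈ (pvSplitSeg (h :: t)).2, s ≠ [] ∧ pvNoEdge s := by
        intro s hs
        exact hitems s ((pvSplitSeg_suffix (h :: t)).subset hs)
      have hlen2 : (pvSplitSeg (h :: t)).2.length ≤ n := by
        have : (pvSplitSeg (h :: t)).2.length ≤ t.length := by
          simp only [pvSplitSeg]
          split
          · exact pvSplitSeg_len t
          · simp
        exact le_trans this (by simpa using Nat.le_of_succ_le_succ hlen)
      rw [pvParse, pv_loopM_step (h :: t) hitems [] (by simp) []]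
      simp only [List.nil_append]
      rw [ihn (pvSplitSeg (h :: t)).2 hlen2 hrest]
      unfold pvCleanJoin
      by_cases hc : pvJoinSp (pvCleanFrags (pvSplitSeg (h :: t)).1) ≠ [] <;>
        simp [hc]

lemma pv_parse_eq_loopM (items : List (List Char))
    (h : ∀ s ∈ items, s ≠ [] ∧ pvNoEdge s) :
    pvParse items = pvLoopM items [] [] :=
  pv_parse_eq_loopM_aux items.length items le_rfl h

lemma pv_kept_good (lines : List String) :
    ∀ s ∈ (lines.map (fun l => PySem.Chars.strip l.toList)).filter
        (fun s => !s.isEmpty && !PySem.Chars.startswith s ['#']),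
      s ≠ [] ∧ pvNoEdge s := by
  intro s hs
  obtain ⟨hmem, hcond⟩ := List.mem_filter.mp hs
  obtain ⟨l, _, hl⟩ := List.mem_map.mp hmem
  constructor
  · intro hnil
    rw [hnil] at hcond
    simp at hcond
  · rw [← hl]; exact pv_noEdge_strip _

lemma pv_top_eq (lines : List String) (language : String) :
    commands_from_code_block_py lines language
      = commands_from_code_block_py_alt lines language := by
  unfold commands_from_code_block_py commands_from_code_block_py_alt
  by_cases h : (["", "bash", "sh", "shell"].contains language) = false
  · rw [if_pos h, if_pos h]
  · rw [if_neg h, if_neg h]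
    have h1 := pv_loopA_eq_loopM (lines.map String.toList) [] [] (by simp)
    rw [pv_joinSp_nil] at h1
    have h2 := pv_parse_eq_loopM _ (pv_kept_good lines)
    show (pvLoopA (lines.map String.toList) [] []).map String.ofList
        = (pvParse ((lines.map (fun l => PySem.Chars.strip l.toList)).filter
            (fun s => !s.isEmpty && !PySem.Chars.startswith s ['#']))).map String.ofList
    rw [h1, h2]
    rw [show (lines.map (fun l => PySem.Chars.strip l.toList))
        = ((lines.map String.toList).map PySem.Chars.strip) by rw [List.map_map]; rfl]

-- ===== VERDICT (by name: the statement is the Claim_ definition above) =====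
theorem commands_from_code_block_py_spec : Claim_equal_commands_from_code_block_py := by
  intro lines language _
  unfold Spec_commands_from_code_block_py
  exact pv_top_eq lines language
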